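-- pv_equiv track=rewrite | github.com/ddu0422/study | algorithm/baekjoon/greedy/1343.py | solution
-- ===== SOURCE A (Python) =====
-- def solution(board):
--     board = board.split('.')
--     result = []
--
--     for element in board:
--         count_x = element.count('X')
--         if count_x % 2 != 0:
--             return -1
--         else:
--             a = count_x // 4
--             b = count_x % 4
--             result.append('AAAA' * a + 'B' * b)
--
--     return '.'.join(result)
-- ===== SOURCE B (Python) =====
-- def _tile(run):
--     return 'AAAA' * (run // 4) + 'B' * (run % 4)
--
--
-- def solution(board):
--     # One left-to-right pass: keep a running count of consecutive (segment) 'X's,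
--     # flush it at every '.' separator; no split, no per-segment count() scan.
--     parts = []
--     run = 0
--     for ch in board:
--         if ch == 'X':
--             run += 1
--         elif ch == '.':
--             if run % 2:
--                 return -1
--             parts.append(_tile(run))
--             run = 0
--     if run % 2:
--         return -1
--     parts.append(_tile(run))
--     return '.'.join(parts)
-- ===== Notes on version B (the rewrite author's own statement) =====
-- stated objective: alternative
-- what changed: Replaces split('.') plus a per-segment count('X') scan by a single left-to-right pass over the string that maintains a running X-count and flushes it at each '.' separator.
-- outside the precondition, e.g. on solution('X'): A returns -1, B returns -1
import Mathlib
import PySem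

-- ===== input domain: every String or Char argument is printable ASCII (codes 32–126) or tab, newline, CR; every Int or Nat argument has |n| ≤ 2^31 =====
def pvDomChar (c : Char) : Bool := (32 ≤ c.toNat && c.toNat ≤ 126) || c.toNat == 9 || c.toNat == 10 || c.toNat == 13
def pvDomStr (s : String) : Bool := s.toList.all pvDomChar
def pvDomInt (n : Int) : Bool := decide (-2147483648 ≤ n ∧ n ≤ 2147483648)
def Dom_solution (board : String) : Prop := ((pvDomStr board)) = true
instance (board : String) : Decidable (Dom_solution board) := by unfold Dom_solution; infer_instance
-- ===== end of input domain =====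

-- B does the same job in one pass; objective: alternative decomposition (no split, no per-segment count scan).
-- Python A returns the int -1 (not a str) when some segment has an odd X-count; those inputs are outside Pre_.

-- ===== PORT A =====
-- 'AAAA' * (cx // 4) + 'B' * (cx % 4)
def tileSeg (cx : Nat) : String :=
  String.ofList (PySem.List.pyRepeat "AAAA".toList (cx / 4 : Nat) ++
                 PySem.List.pyRepeat "B".toList (cx % 4 : Nat))

-- the for-loop over the split segments; none = the early 'return -1'
def aLoop : List String → Option (List String)
  | [] => some []
  | e :: rest =>
    let cx := PySem.Str.count e "X"
    if cx % 2 ≠ 0 then none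
    else (aLoop rest).map (tileSeg cx :: ·)

def solution (board : String) : String :=
  match PySem.Str.split? board "." with
  | none => "-1"          -- unreachable: the separator "." is nonempty
  | some segs =>
    match aLoop segs with
    | none => "-1"        -- Python returns the int -1 here (not a str); outside Pre_solution
    | some result => PySem.Str.join "." result

-- ===== PORT B =====
-- the for-loop over the characters, state = pending run of 'X'; none = the early 'return -1'
def bLoop : List Char → Nat → Option (List String)
  | [], run => if run % 2 ≠ 0 then none else some [tileSeg run]
  | c :: rest, run =>
    if c = 'X' then bLoop rest (run + 1)
    else if c = '.' then
      if run % 2 ≠ 0 then none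
      else (bLoop rest 0).map (tileSeg run :: ·)
    else bLoop rest run

def solution_alt (board : String) : String :=
  match bLoop board.toList 0 with
  | none => "-1"          -- Python B returns the int -1 here (not a str); outside Pre_solution
  | some parts => PySem.Str.join "." parts

-- ===== PRECONDITION & SPEC =====
-- Pre_ excludes exactly the boards with a '.'-separated segment of odd X-count, where
-- Python A returns the int -1, which is not a value of the declared return type str.
def Pre_solution (board : String) : Prop :=
  ∀ seg ∈ PySem.Chars.splitOn board.toList ['.'], seg.count 'X' % 2 = 0
instance (board : String) : Decidable (Pre_solution board) := by unfold Pre_solution; infer_instance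
def pvWitness_solution : String := "XXXX..XX"

def Spec_solution (board : String) (out : String) : Prop := out = solution_alt board
instance (board : String) (out : String) : Decidable (Spec_solution board out) := by unfold Spec_solution; infer_instance

-- ===== CLAIM (what is proved, stated in full; the proofs are below) =====
def Claim_equal_solution : Prop := ∀ (board : String), Dom_solution board → Pre_solution board → Spec_solution board (solution board)

-- ===== LEMMAS AND PROOFS =====

-- split on a single '.' as a structural recursion
def mySplit : List Char → List (List Char)
  | [] => [[]]
  | c :: rest => if c = '.' then [] :: mySplit rest else (mySplit rest).modifyHead (c :: ·)

theorem mySplit_ne_nil (l : List Char) : mySplit l ≠ [] := by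
  cases l with
  | nil => simp [mySplit]
  | cons c rest =>
    simp only [mySplit]
    split <;> simp [List.modifyHead_eq_nil_iff, mySplit_ne_nil rest]

theorem splitOn_go_spec (fuel : Nat) (l cur : List Char) (acc : List (List Char))
    (h : l.length ≤ fuel) :
    PySem.Chars.splitOn.go ['.'] fuel l cur acc
      = acc.reverse ++ (mySplit l).modifyHead (cur.reverse ++ ·) := by
  induction fuel generalizing l cur acc with
  | zero =>
    have : l = [] := List.eq_nil_of_length_eq_zero (Nat.le_zero.mp h)
    subst this
    simp [PySem.Chars.splitOn.go, mySplit]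
  | succ fuel ih =>
    cases l with
    | nil => simp [PySem.Chars.splitOn.go, mySplit]
    | cons c rest =>
      by_cases hc : c = '.'
      · subst hc
        have hpref : (['.'] : List Char).isPrefixOf ('.' :: rest) = true := by
          simp [List.isPrefixOf]
        have hdrop : List.drop (['.'] : List Char).length ('.' :: rest) = rest := rfl
        simp only [PySem.Chars.splitOn.go, hpref, if_pos, hdrop]
        rw [ih rest [] (cur.reverse :: acc) (by simpa using Nat.le_of_succ_le_succ h)]
        simp only [mySplit]
        cases mySplit rest <;> simp [List.modifyHead]
      · have hpref : (['.'] : List Char).isPrefixOf (c :: rest) = false := by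
          simp [List.isPrefixOf, Ne.symm hc]
        simp only [PySem.Chars.splitOn.go, hpref]
        rw [ih rest (c :: cur) acc (by simpa using Nat.le_of_succ_le_succ h)]
        simp only [mySplit, if_neg hc]
        cases hms : mySplit rest with
        | nil => exact absurd hms (mySplit_ne_nil rest)
        | cons s ss => simp [List.modifyHead]

theorem splitOn_dot (l : List Char) :
    PySem.Chars.splitOn l ['.'] = mySplit l := by
  unfold PySem.Chars.splitOn
  rw [splitOn_go_spec (l.length + 1) l [] [] (Nat.le_succ _)]
  · cases hms : mySplit l with
    | nil => exact absurd hms (mySplit_ne_nil l)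
    | cons s ss => simp [List.modifyHead]

theorem count_go_spec (fuel : Nat) (l : List Char) (acc : Nat)
    (h : l.length ≤ fuel) :
    PySem.Chars.count.go ['X'] fuel l acc = acc + l.count 'X' := by
  induction fuel generalizing l acc with
  | zero =>
    have : l = [] := List.eq_nil_of_length_eq_zero (Nat.le_zero.mp h)
    subst this
    simp [PySem.Chars.count.go]
  | succ fuel ih =>
    cases l with
    | nil => simp [PySem.Chars.count.go]
    | cons c rest =>
      by_cases hc : c = 'X'
      · subst hc
        have hpref : (['X'] : List Char).isPrefixOf ('X' :: rest) = true := by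
          simp [List.isPrefixOf]
        have hdrop : List.drop (['X'] : List Char).length ('X' :: rest) = rest := rfl
        simp only [PySem.Chars.count.go, hpref, if_pos, hdrop]
        rw [ih rest (acc + 1) (by simpa using Nat.le_of_succ_le_succ h)]
        simp
        omega
      · have hpref : (['X'] : List Char).isPrefixOf (c :: rest) = false := by
          simp [List.isPrefixOf, Ne.symm hc]
        simp only [PySem.Chars.count.go, hpref]
        rw [ih rest acc (by simpa using Nat.le_of_succ_le_succ h)]
        simp [hc]

theorem count_X (l : List Char) : PySem.Chars.count l ['X'] = l.count 'X' := by
  unfold PySem.Chars.count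
  simpa using count_go_spec l.length l 0 (Nat.le_refl _)

-- A's segment loop, restated over char lists
def aLoopC : List (List Char) → Option (List String)
  | [] => some []
  | e :: rest =>
    if e.count 'X' % 2 ≠ 0 then none
    else (aLoopC rest).map (tileSeg (e.count 'X') :: ·)

theorem aLoop_eq_aLoopC (css : List (List Char)) :
    aLoop (css.map String.ofList) = aLoopC css := by
  induction css with
  | nil => simp [aLoop, aLoopC]
  | cons e rest ih =>
    simp only [List.map_cons, aLoop, aLoopC, PySem.Str.count, ih]
    have : (String.ofList e).toList = e := by simp
    rw [this]
    simp [count_X]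

-- the key invariant: one pass with pending run = A's loop on the split, first segment offset by run
theorem bLoop_spec (l : List Char) (run : Nat) :
    bLoop l run
      = match mySplit l with
        | [] => some []
        | s :: ss =>
          if (run + s.count 'X') % 2 ≠ 0 then none
          else (aLoopC ss).map (tileSeg (run + s.count 'X') :: ·) := by
  induction l generalizing run with
  | nil => simp [bLoop, mySplit, aLoopC]
  | cons c rest ih =>
    by_cases hx : c = 'X'
    · subst hx
      have h1 : mySplit ('X' :: rest) = (mySplit rest).modifyHead ('X' :: ·) := by
        simp [mySplit]
      simp only [bLoop, h1, ih]
      cases hms : mySplit rest with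
      | nil => exact absurd hms (mySplit_ne_nil rest)
      | cons s ss =>
        simp [List.modifyHead]
        have : run + 1 + s.count 'X' = run + (s.count 'X' + 1) := by omega
        rw [this]
    · by_cases hd : c = '.'
      · subst hd
        have h1 : mySplit ('.' :: rest) = [] :: mySplit rest := by simp [mySplit]
        have hne : ('.' : Char) ≠ 'X' := by decide
        simp only [bLoop, if_neg hne, h1, ih]
        by_cases hr : run % 2 ≠ 0
        · simp [hr]
        · simp only [List.count_nil, Nat.add_zero, hr, ite_false]
          cases hms : mySplit rest with
          | nil => exact absurd hms (mySplit_ne_nil rest)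
          | cons s ss => simp [aLoopC]
      · have h1 : mySplit (c :: rest) = (mySplit rest).modifyHead (c :: ·) := by
          simp [mySplit, hd]
        simp only [bLoop, if_neg hx, if_neg hd, h1, ih]
        cases hms : mySplit rest with
        | nil => exact absurd hms (mySplit_ne_nil rest)
        | cons s ss => simp [List.modifyHead, hx]

theorem bLoop_eq_aLoopC (l : List Char) : bLoop l 0 = aLoopC (mySplit l) := by
  rw [bLoop_spec]
  cases hms : mySplit l with
  | nil => exact absurd hms (mySplit_ne_nil l)
  | cons s ss => simp [aLoopC]

theorem split?_dot (board : String) :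
    PySem.Str.split? board "." = some ((mySplit board.toList).map String.ofList) := by
  unfold PySem.Str.split? PySem.Chars.split?
  have hsep : (".".toList : List Char) = ['.'] := rfl
  rw [hsep]
  simp [splitOn_dot]

-- ===== VERDICT (by name: the statement is the Claim_ definition above) =====
theorem solution_spec : Claim_equal_solution := by
  intro board _ _
  unfold Spec_solution solution solution_alt
  simp only [split?_dot, aLoop_eq_aLoopC, bLoop_eq_aLoopC]
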